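-- pv_equiv track=rewrite | github.com/azure-way/aidocwriter | src/docwriter/messaging.py | _format_stage_label
-- ===== SOURCE A (Python) =====
-- from typing import Any, Dict, List, Mapping, Optional, Set, Union
--
-- def _format_stage_label(stage: Any) -> str:
--     if not isinstance(stage, str) or not stage:
--         return "Status update"
--     parts = stage.split("_")
--     if not parts:
--         return "Status update"
--     words = [parts[0].capitalize()] + [p.lower() for p in parts[1:]]
--     return " ".join(words)
-- ===== SOURCE B (Python) =====
-- def _format_stage_label(stage) -> str:
--     if not isinstance(stage, str) or not stage:
--         return "Status update"
--     return stage.replace("_", " ").capitalize()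
-- ===== Notes on version B (the rewrite author's own statement) =====
-- stated objective: simpler
-- what changed: Replaces the split-on-underscore / per-part capitalize-and-lower list comprehension / join pipeline with a single underscore-to-space replace followed by one whole-string capitalize().
import Mathlib
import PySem

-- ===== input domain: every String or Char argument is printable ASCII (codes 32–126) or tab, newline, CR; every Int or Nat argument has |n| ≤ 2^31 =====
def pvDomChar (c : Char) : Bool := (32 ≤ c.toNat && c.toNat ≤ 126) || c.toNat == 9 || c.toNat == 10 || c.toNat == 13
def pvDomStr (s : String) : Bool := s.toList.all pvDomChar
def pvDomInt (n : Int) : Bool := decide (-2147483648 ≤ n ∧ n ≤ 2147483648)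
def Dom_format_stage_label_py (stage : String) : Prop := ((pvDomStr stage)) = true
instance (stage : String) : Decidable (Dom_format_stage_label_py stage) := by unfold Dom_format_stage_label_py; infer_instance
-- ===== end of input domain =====

-- B replaces A's split/per-part-capitalize-and-lower/join pipeline with one underscore-to-space replace
-- followed by a single whole-string capitalize(); objective: simpler.

-- ===== PORT A =====
-- hand port of Python str.capitalize (exact on the ASCII domain, where title-casing the
-- first character coincides with upperChar)
def pyCapitalize (cs : List Char) : List Char :=
  match cs with
  | [] => []
  | c :: t => PySem.Chars.upperChar c :: t.map PySem.Chars.lowerChar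

def format_stage_label_py (stage : String) : String :=
  if stage = "" then "Status update"            -- `not stage` (isinstance is vacuous: stage : String)
  else
    let parts := PySem.Chars.splitOn stage.toList ['_']   -- stage.split("_")
    if parts = [] then "Status update"          -- `if not parts` (split never returns [])
    else                                        -- [parts[0].capitalize()] + [p.lower() for p in parts[1:]]
      String.ofList (PySem.Chars.join [' '] (pyCapitalize parts.head! :: parts.tail.map PySem.Chars.lower))  -- " ".join(words)

-- ===== PORT B =====
def format_stage_label_py_alt (stage : String) : String :=
  if stage = "" then "Status update"
  else String.ofList (pyCapitalize (PySem.Str.replace stage "_" " ").toList)  -- stage.replace("_"," ").capitalize()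

-- ===== PRECONDITION & SPEC =====
def Spec_format_stage_label_py (stage : String) (out : String) : Prop := out = format_stage_label_py_alt stage
instance (stage : String) (out : String) : Decidable (Spec_format_stage_label_py stage out) := by unfold Spec_format_stage_label_py; infer_instance

-- ===== CLAIM (what is proved, stated in full; the proofs are below) =====
def Claim_equal_format_stage_label_py : Prop := ∀ (stage : String), Dom_format_stage_label_py stage → Spec_format_stage_label_py stage (format_stage_label_py stage)

-- ===== LEMMAS AND PROOFS =====

/-- `'_' ↦ ' '`, the character-wise effect of `replace "_" " "`. -/
def subChar (c : Char) : Char := if c = '_' then ' ' else c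

/-- Structural model of splitting on `'_'` with an accumulated first piece `pre`. -/
def splitSub (pre : List Char) : List Char → List (List Char)
  | [] => [pre]
  | c :: t => if c = '_' then pre :: splitSub [] t else splitSub (pre ++ [c]) t

/-- First part capitalized, the rest lowered — A's word processing. -/
def capFirst : List (List Char) → List (List Char)
  | [] => []
  | p :: ps => pyCapitalize p :: ps.map (List.map PySem.Chars.lowerChar)

lemma splitSub_cons_us (pre t) : splitSub pre ('_' :: t) = pre :: splitSub [] t := by
  simp [splitSub]

lemma splitSub_cons_ne (pre t) {c : Char} (hc : c ≠ '_') :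
    splitSub pre (c :: t) = splitSub (pre ++ [c]) t := by
  simp [splitSub, hc]

lemma splitSub_ne_nil (l pre) : splitSub pre l ≠ [] := by
  induction l generalizing pre with
  | nil => simp [splitSub]
  | cons c t ih => by_cases h : c = '_' <;> simp [splitSub, h, ih]

lemma replace_go_eq (fuel) : ∀ l acc, l.length ≤ fuel →
    PySem.Chars.replace.go ['_'] [' '] fuel l acc = acc.reverse ++ l.map subChar := by
  induction fuel with
  | zero =>
    intro l acc h
    cases l with
    | nil => simp [PySem.Chars.replace.go]
    | cons c t => simp at h
  | succ n ih =>
    intro l acc h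
    cases l with
    | nil => simp [PySem.Chars.replace.go]
    | cons c t =>
      simp only [PySem.Chars.replace.go]
      by_cases hc : c = '_'
      · rw [if_pos (by simp [hc, List.isPrefixOf])]
        rw [ih _ _ (by simpa using h)]
        simp [subChar, hc]
      · rw [if_neg (by simp [List.isPrefixOf]; exact fun h' => hc h'.symm)]
        rw [ih t (c :: acc) (by simpa using h)]
        simp [subChar, hc]

lemma splitOn_go_eq (fuel) : ∀ l cur acc, l.length < fuel →
    PySem.Chars.splitOn.go ['_'] fuel l cur acc = acc.reverse ++ splitSub cur.reverse l := by
  induction fuel with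
  | zero => intro l cur acc h; omega
  | succ n ih =>
    intro l cur acc h
    cases l with
    | nil => simp [PySem.Chars.splitOn.go, splitSub]
    | cons c t =>
      simp only [PySem.Chars.splitOn.go]
      by_cases hc : c = '_'
      · rw [if_pos (by simp [hc, List.isPrefixOf])]
        rw [show List.drop ['_'].length (c :: t) = t from rfl]
        rw [ih t [] (cur.reverse :: acc) (by simpa using h)]
        simp [splitSub_cons_us, hc]
      · rw [if_neg (by simp [List.isPrefixOf]; exact fun h' => hc h'.symm)]
        rw [ih t (c :: cur) acc (by simpa using h)]
        simp [splitSub_cons_ne _ _ hc]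

lemma lower_space : PySem.Chars.lowerChar ' ' = ' ' := by decide
lemma upper_space : PySem.Chars.upperChar ' ' = ' ' := by decide

lemma join_lower (l) : ∀ pre,
    PySem.Chars.join [' '] ((splitSub pre l).map (List.map PySem.Chars.lowerChar)) =
      pre.map PySem.Chars.lowerChar ++ l.map (fun c => PySem.Chars.lowerChar (subChar c)) := by
  induction l with
  | nil => intro pre; simp [splitSub, PySem.Chars.join, List.intercalate]
  | cons c t ih =>
    intro pre
    by_cases hc : c = '_'
    · obtain ⟨y, yt, hy⟩ := List.exists_cons_of_ne_nil (splitSub_ne_nil t [])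
      subst hc
      rw [splitSub_cons_us, hy, List.map_cons, List.map_cons, PySem.Chars.join_cons_cons,
        ← List.map_cons, ← hy, ih []]
      simp [subChar, lower_space]
    · rw [splitSub_cons_ne _ _ hc, ih (pre ++ [c])]
      simp [subChar, hc]

lemma join_cap (l) : ∀ pre, pre ≠ [] →
    PySem.Chars.join [' '] (capFirst (splitSub pre l)) = pyCapitalize (pre ++ l.map subChar) := by
  induction l with
  | nil => intro pre _; simp [splitSub, capFirst, PySem.Chars.join_singleton]
  | cons c t ih =>
    intro pre hpre
    obtain ⟨p, pt, rfl⟩ := List.exists_cons_of_ne_nil hpre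
    by_cases hc : c = '_'
    · obtain ⟨y, yt, hy⟩ := List.exists_cons_of_ne_nil (splitSub_ne_nil t [])
      subst hc
      rw [splitSub_cons_us, capFirst, hy, List.map_cons, PySem.Chars.join_cons_cons,
        ← List.map_cons, ← hy]
      have hl := join_lower t []
      simp only [List.map_nil, List.nil_append] at hl
      rw [hl]
      simp [pyCapitalize, subChar, lower_space, Function.comp_def]
    · rw [splitSub_cons_ne _ _ hc, ih _ (by simp)]
      simp [pyCapitalize, subChar, hc]

lemma lower_eq_map : PySem.Chars.lower = List.map PySem.Chars.lowerChar := funext fun _ => rfl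

-- ===== VERDICT (by name: the statement is the Claim_ definition above) =====
theorem format_stage_label_py_spec : Claim_equal_format_stage_label_py := by
  intro stage _
  unfold Spec_format_stage_label_py format_stage_label_py format_stage_label_py_alt
  by_cases h : stage = ""
  · simp [h]
  · simp only [if_neg h]
    have hne : stage.toList ≠ [] := by
      simpa [String.toList_eq_nil_iff] using h
    have hsplit : PySem.Chars.splitOn stage.toList ['_'] = splitSub [] stage.toList := by
      unfold PySem.Chars.splitOn
      rw [splitOn_go_eq _ _ _ _ (by omega)]
      simp
    have hrep : (PySem.Str.replace stage "_" " ").toList = stage.toList.map subChar := by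
      rw [PySem.Str.toList_replace]
      rw [show ("_" : String).toList = ['_'] from rfl, show (" " : String).toList = [' '] from rfl]
      unfold PySem.Chars.replace
      rw [if_neg (by simp), replace_go_eq _ _ _ (le_refl _)]
      simp
    rw [hrep]
    obtain ⟨c, t, hct⟩ := List.exists_cons_of_ne_nil hne
    rw [hsplit, hct]
    by_cases hc : c = '_'
    · obtain ⟨y, yt, hy⟩ := List.exists_cons_of_ne_nil (splitSub_ne_nil t [])
      subst hc
      rw [splitSub_cons_us, hy]
      simp only [List.cons_ne_nil, List.head!_cons, List.tail_cons, reduceIte]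
      congr 1
      have hcf : pyCapitalize [] :: List.map PySem.Chars.lower (y :: yt) = capFirst ([] :: y :: yt) := by
        simp [capFirst, pyCapitalize, lower_eq_map]
      have hl := join_lower t []
      simp only [List.map_nil, List.nil_append] at hl
      rw [hcf]
      simp only [capFirst, pyCapitalize, List.map_cons]
      rw [PySem.Chars.join_cons_cons, ← List.map_cons, ← hy, hl]
      simp [subChar, upper_space, Function.comp_def]
    · rw [splitSub_cons_ne _ _ hc, List.nil_append]
      have hj := join_cap t [c] (by simp)
      obtain ⟨y, yt, hy⟩ := List.exists_cons_of_ne_nil (splitSub_ne_nil t [c])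
      rw [hy]
      simp only [List.cons_ne_nil, List.head!_cons, List.tail_cons, reduceIte]
      congr 1
      have hcf : pyCapitalize y :: List.map PySem.Chars.lower yt = capFirst (y :: yt) := by
        simp [capFirst, lower_eq_map]
      rw [hcf, ← hy, hj]
      simp [pyCapitalize, subChar, hc]
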